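-- pv_equiv track=rewrite | github.com/ibukiIWAMURA/master-ILM | production/Production_original_5.py | clustering_rule_set
-- ===== SOURCE A (Python) =====
-- def parse_rule(rule):
--     parts = rule.split('->')
--     semantic_structure = parts[0].strip()
--     form = parts[1].strip()
--     return semantic_structure, form
--
-- def clustering_rule_set(rule_set):
--     holistic_rule_set = []
--     generalization_rule_set_1 = []
--     generalization_rule_set_2 = []
--     generalization_rule_set_3 = []
--     word_rule_set = []
--
--     for rule in rule_set:
--         semantic_structure, _ = parse_rule(rule)
--
--         if not semantic_structure.startswith("S/"):
--             word_rule_set.append(rule)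
--         else:
--             p_count = semantic_structure.count("_p")
--             x_count = semantic_structure.count("_x")
--             y_count = semantic_structure.count("_y")
--             total_variables = p_count + x_count + y_count
--
--             if total_variables == 0:
--                 holistic_rule_set.append(rule)
--             elif total_variables == 1:
--                 generalization_rule_set_1.append(rule)
--             elif total_variables == 2:
--                 generalization_rule_set_2.append(rule)
--             elif total_variables == 3:
--                 generalization_rule_set_3.append(rule)
--
--     return holistic_rule_set, generalization_rule_set_1, generalization_rule_set_2, generalization_rule_set_3, word_rule_set
-- ===== SOURCE B (Python) =====
-- def clustering_rule_set(rule_set):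
--     # Compute each rule's bucket key once, then build the five groups by selection.
--     def bucket(rule):
--         lhs, _rhs, *_ = rule.split('->')   # a rule must have an lhs and an rhs
--         sem = lhs.strip()
--         if not sem.startswith("S/"):
--             return -1
--         return sem.count("_p") + sem.count("_x") + sem.count("_y")
--     keyed = [(bucket(r), r) for r in rule_set]
--     return tuple([r for k, r in keyed if k == i] for i in (0, 1, 2, 3, -1))
-- ===== Notes on version B (the rewrite author's own statement) =====
-- stated objective: alternative
-- what changed: B computes one bucket key per rule with a single helper and then builds the five output groups by filtering the keyed list, replacing A's parse_rule helper plus single fold over five named accumulators with an if/elif dispatch chain.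
import Mathlib
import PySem

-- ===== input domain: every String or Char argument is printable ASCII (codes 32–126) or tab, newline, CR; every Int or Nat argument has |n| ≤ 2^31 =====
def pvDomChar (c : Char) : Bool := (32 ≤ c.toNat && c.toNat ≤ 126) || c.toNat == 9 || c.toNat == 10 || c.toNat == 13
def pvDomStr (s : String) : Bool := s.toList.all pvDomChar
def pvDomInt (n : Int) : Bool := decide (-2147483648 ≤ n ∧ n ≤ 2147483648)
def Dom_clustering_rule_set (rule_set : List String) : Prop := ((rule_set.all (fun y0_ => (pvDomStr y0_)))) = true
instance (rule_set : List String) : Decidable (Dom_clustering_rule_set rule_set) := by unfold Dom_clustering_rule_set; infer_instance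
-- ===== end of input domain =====

-- B replaces A's single fold with five named accumulators and an if/elif chain by a keyed map
-- (one bucket number per rule) followed by per-bucket selection (objective: alternative).
-- Pre_ excludes exactly the inputs on which A raises (a rule without '->': IndexError in parse_rule).


-- ===== PORT A =====
def pvParseRule? (rule : String) : Option (String × String) :=
  let parts := (PySem.Str.split? rule "->").getD []
  match PySem.List.pyGet? parts 0, PySem.List.pyGet? parts 1 with
  | some p0, some p1 => some (PySem.Str.strip p0, PySem.Str.strip p1)
  | _, _ => none

def pvStepA (acc : List String × List String × List String × List String × List String)
    (rule : String) : List String × List String × List String × List String × List String :=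
  match pvParseRule? rule with
  | none => acc
  | some (sem, _) =>
    match acc with
    | (h, g1, g2, g3, w) =>
      if !(PySem.Str.startswith sem "S/") then (h, g1, g2, g3, w ++ [rule])
      else
        let t := PySem.Str.count sem "_p" + PySem.Str.count sem "_x" + PySem.Str.count sem "_y"
        if t = 0 then (h ++ [rule], g1, g2, g3, w)
        else if t = 1 then (h, g1 ++ [rule], g2, g3, w)
        else if t = 2 then (h, g1, g2 ++ [rule], g3, w)
        else if t = 3 then (h, g1, g2, g3 ++ [rule], w)
        else acc

def clustering_rule_set (rule_set : List String) :
    List String × List String × List String × List String × List String :=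
  rule_set.foldl pvStepA ([], [], [], [], [])

-- ===== PORT B =====
def pvBucket (rule : String) : Int :=
  match (PySem.Str.split? rule "->").getD [] with
  | lhs :: _rhs :: _ =>   -- 'lhs, _rhs, *_ = rule.split('->')'
    let sem := PySem.Str.strip lhs
    if !(PySem.Str.startswith sem "S/") then -1
    else (PySem.Str.count sem "_p" : Int) + PySem.Str.count sem "_x" + PySem.Str.count sem "_y"
  | _ => 0   -- Python raises ValueError here (fewer than two pieces); outside Pre_


def clustering_rule_set_alt (rule_set : List String) :
    List String × List String × List String × List String × List String :=
  let keyed := rule_set.map (fun r => (pvBucket r, r))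
  ((keyed.filter (fun p => p.1 == 0)).map Prod.snd,
   (keyed.filter (fun p => p.1 == 1)).map Prod.snd,
   (keyed.filter (fun p => p.1 == 2)).map Prod.snd,
   (keyed.filter (fun p => p.1 == 3)).map Prod.snd,
   (keyed.filter (fun p => p.1 == -1)).map Prod.snd)

-- ===== PRECONDITION & SPEC =====
-- Pre_ excludes exactly the inputs where A raises: a rule without '->' makes parse_rule's
-- parts[1] an IndexError (the split yields fewer than two pieces).
def Pre_clustering_rule_set (rule_set : List String) : Prop :=
  ∀ rule ∈ rule_set, 2 ≤ ((PySem.Str.split? rule "->").getD []).length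
instance (rule_set : List String) : Decidable (Pre_clustering_rule_set rule_set) := by
  unfold Pre_clustering_rule_set; infer_instance

def pvWitness_clustering_rule_set : List String := ["S/_p -> a", "cat -> meow"]

def Spec_clustering_rule_set (rule_set : List String)
    (out : List String × List String × List String × List String × List String) : Prop :=
  out = clustering_rule_set_alt rule_set
instance (rule_set : List String)
    (out : List String × List String × List String × List String × List String) :
    Decidable (Spec_clustering_rule_set rule_set out) := by
  unfold Spec_clustering_rule_set; infer_instance

-- ===== CLAIM (what is proved, stated in full; the proofs are below) =====
def Claim_equal_clustering_rule_set : Prop := ∀ (rule_set : List String), Dom_clustering_rule_set rule_set → Pre_clustering_rule_set rule_set → Spec_clustering_rule_set rule_set (clustering_rule_set rule_set)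

-- ===== LEMMAS AND PROOFS =====
-- proof-only selector: B's bucket k of the keyed list
def pvSel (k : Int) (rs : List String) : List String :=
  ((rs.map (fun r => (pvBucket r, r))).filter (fun p => p.1 == k)).map Prod.snd

theorem pvParse_eq (r p0 p1 : String) (rest : List String)
    (hps : (PySem.Str.split? r "->").getD [] = p0 :: p1 :: rest) :
    pvParseRule? r = some (PySem.Str.strip p0, PySem.Str.strip p1) := by
  simp only [pvParseRule?, hps]
  have h0 : (0:Int) ≤ (rest.length:Int) + 1 := by omega
  norm_num [PySem.List.pyGet?, PySem.List.pyIdx?, h0]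

theorem pvBucket_eq (r p0 p1 : String) (rest : List String)
    (hps : (PySem.Str.split? r "->").getD [] = p0 :: p1 :: rest) :
    pvBucket r =
      (if !(PySem.Str.startswith (PySem.Str.strip p0) "S/") then -1
       else (PySem.Str.count (PySem.Str.strip p0) "_p" : Int)
            + PySem.Str.count (PySem.Str.strip p0) "_x"
            + PySem.Str.count (PySem.Str.strip p0) "_y") := by
  simp only [pvBucket, hps]

theorem pvSelAux (k b : Int) (r : String) (l : List (Int × String)) :
    ((((b, r)) :: l).filter (fun p => p.1 == k)).map Prod.snd
      = (if b == k then [r] else []) ++ (l.filter (fun p => p.1 == k)).map Prod.snd := by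
  rw [List.filter_cons]
  by_cases hb : (b == k) = true <;> simp [hb]

theorem pvSel_cons (k : Int) (r : String) (rs : List String) :
    pvSel k (r :: rs) = (if pvBucket r == k then [r] else []) ++ pvSel k rs := by
  have h1 : pvSel k (r :: rs)
      = (((pvBucket r, r) :: rs.map (fun s => (pvBucket s, s))).filter (fun p => p.1 == k)).map Prod.snd := rfl
  rw [h1, pvSelAux]
  rfl

theorem pvMain (rs : List String)
    (hpre : ∀ rule ∈ rs, 2 ≤ ((PySem.Str.split? rule "->").getD []).length)
    (h g1 g2 g3 w : List String) :
    rs.foldl pvStepA (h, g1, g2, g3, w) =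
      (h ++ pvSel 0 rs, g1 ++ pvSel 1 rs, g2 ++ pvSel 2 rs, g3 ++ pvSel 3 rs,
       w ++ pvSel (-1) rs) := by
  induction rs generalizing h g1 g2 g3 w with
  | nil => simp [pvSel]
  | cons r rs ih =>
    have hr := hpre r (List.mem_cons_self ..)
    have hrest : ∀ rule ∈ rs, 2 ≤ ((PySem.Str.split? rule "->").getD []).length :=
      fun rule hm => hpre rule (List.mem_cons_of_mem _ hm)
    obtain ⟨p0, p1, rest, hps⟩ :
        ∃ p0 p1 rest, (PySem.Str.split? r "->").getD [] = p0 :: p1 :: rest := by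
      match hp : (PySem.Str.split? r "->").getD [] with
      | [] => rw [hp] at hr; simp at hr
      | [a] => rw [hp] at hr; simp at hr
      | a :: b :: t => exact ⟨a, b, t, rfl⟩
    have hparse := pvParse_eq r p0 p1 rest hps
    have hbucket := pvBucket_eq r p0 p1 rest hps
    rw [List.foldl_cons]
    simp only [pvStepA, hparse]
    by_cases hs : PySem.Str.startswith (PySem.Str.strip p0) "S/" = true
    · have hs' : PySem.Chars.startswith (PySem.Chars.strip p0.toList) ['S', '/'] = true := by
        simpa using hs
      have hb : pvBucket r =
          ((PySem.Str.count (PySem.Str.strip p0) "_p"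
            + PySem.Str.count (PySem.Str.strip p0) "_x"
            + PySem.Str.count (PySem.Str.strip p0) "_y" : Nat) : Int) := by
        rw [hbucket, hs]
        push_cast
        simp
      generalize ht : PySem.Str.count (PySem.Str.strip p0) "_p"
            + PySem.Str.count (PySem.Str.strip p0) "_x"
            + PySem.Str.count (PySem.Str.strip p0) "_y" = t at hb ⊢
      rcases Nat.lt_or_ge t 4 with h4 | h4
      · interval_cases t <;>
          simp [hs', ih hrest, pvSel_cons, hb, List.append_assoc]
      · have h0 : ¬ t = 0 := by omega
        have h1 : ¬ t = 1 := by omega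
        have h2 : ¬ t = 2 := by omega
        have h3 : ¬ t = 3 := by omega
        simp [hs', h0, h1, h2, h3, ih hrest, pvSel_cons, hb]
        omega
    · have hs' : PySem.Chars.startswith (PySem.Chars.strip p0.toList) ['S', '/'] = false := by
        simpa using hs
      have hb : pvBucket r = -1 := by simp [hbucket, hs']
      simp [hs', ih hrest, pvSel_cons, hb, List.append_assoc]

-- ===== VERDICT (by name: the statement is the Claim_ definition above) =====
theorem clustering_rule_set_spec : Claim_equal_clustering_rule_set := by
  intro rs _ hpre
  show clustering_rule_set rs = clustering_rule_set_alt rs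
  rw [clustering_rule_set, pvMain rs hpre]
  simp [clustering_rule_set_alt, pvSel]
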